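-- pv_equiv track=rewrite | github.com/MbatuEr/practice-python | Recursion/recursion.py | tree_diameter
-- ===== SOURCE A (Python) =====
-- from typing import List
--
-- def tree_diameter(adj: List[List[tuple[int, int]]]) -> int:
--     n = len(adj)
--     if n == 0:
--         return 0
--
--     def dfs(node: int, parent: int, adj: List[List[tuple[int, int]]]) -> tuple[int, int]:
--         max_dist = 0
--         for to, weight in adj[node]:
--             if to != parent:
--                 _, dist = dfs(to, node, adj)
--                 max_dist = max(max_dist, dist + weight)
--
--         return node, max_dist
--
--     _, diameter = dfs(0, -1, adj)
--     return diameter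
-- ===== SOURCE B (Python) =====
-- from typing import List
--
-- def tree_diameter(adj: List[List[tuple[int, int]]]) -> int:
--     if not adj:
--         return 0
--     best = 0
--     stack = [(0, -1, 0)]
--     while stack:
--         node, parent, dist = stack.pop()
--         if dist > best:
--             best = dist
--         for to, weight in adj[node]:
--             if to != parent:
--                 stack.append((to, node, dist + weight))
--     return best
-- ===== Notes on version B (the rewrite author's own statement) =====
-- stated objective: alternative
-- what changed: Replaces A's bottom-up recursive max-combine DFS by an iterative explicit-stack top-down traversal that pushes each non-parent neighbor with the accumulated root distance and tracks one running global maximum; Pre_ holds exactly where A returns (it excludes only inputs on which A raises IndexError or RecursionError).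
import Mathlib
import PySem

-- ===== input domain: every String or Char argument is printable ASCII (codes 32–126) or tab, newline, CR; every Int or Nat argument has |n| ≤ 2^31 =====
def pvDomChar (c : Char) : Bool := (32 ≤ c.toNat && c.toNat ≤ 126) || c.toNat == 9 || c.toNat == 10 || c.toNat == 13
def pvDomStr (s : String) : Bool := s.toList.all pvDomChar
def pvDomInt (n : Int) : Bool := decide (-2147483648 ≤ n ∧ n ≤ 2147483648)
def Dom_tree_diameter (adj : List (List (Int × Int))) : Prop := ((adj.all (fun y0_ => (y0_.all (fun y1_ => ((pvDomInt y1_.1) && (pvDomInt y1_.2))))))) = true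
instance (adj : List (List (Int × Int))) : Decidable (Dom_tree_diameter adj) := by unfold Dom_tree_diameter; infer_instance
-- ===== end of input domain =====

-- B replaces A's bottom-up recursive max-combine DFS by an iterative explicit-stack
-- top-down traversal accumulating root distances into one running maximum (alternative
-- decomposition, same cost).


-- ===== PORT A =====
-- Python's adj[node] (wrapped indexing); [] stands for the out-of-range read A would
-- raise IndexError on — Pre_ keeps the traversal away from those.
def pvRow (adj : List (List (Int × Int))) (v : Int) : List (Int × Int) :=
  (PySem.List.pyGet? adj v).getD []

-- total number of edge entries: both ports size their fuel from it
def pvE (adj : List (List (Int × Int))) : Nat := (adj.map List.length).sum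

-- Literal port of A's recursive `dfs` (returns the (node, max_dist) pair like the
-- Python).  The Nat fuel makes the recursion total in Lean; under Pre_ the call depth
-- is bounded by 2*pvE adj + 2, so the top call never exhausts its fuel.
def pvDfsA (adj : List (List (Int × Int))) : Nat → Int → Int → Int × Int
  | 0, node, _ => (node, 0)   -- fuel exhausted: unreachable under Pre_
  | fuel+1, node, parent =>
    (node,
      (pvRow adj node).foldl
        (fun md tw =>
          if tw.1 ≠ parent then max md ((pvDfsA adj fuel tw.1 node).2 + tw.2) else md) 0)

def tree_diameter (adj : List (List (Int × Int))) : Int :=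
  if adj.length = 0 then 0 else (pvDfsA adj (2 * pvE adj + 3) 0 (-1)).2

-- ===== PORT B =====
def pvMaxLen (adj : List (List (Int × Int))) : Nat :=
  adj.foldl (fun m l => max m l.length) 0

-- Port of Source B's while-loop; the Lean list head is the Python stack top (append then
-- pop-from-end ⇒ cons then match on head).  The Nat fuel bounds the number of pops
-- (under Pre_ it is never exhausted); the loop exits on an empty stack regardless of
-- remaining fuel.
def pvLoopB (adj : List (List (Int × Int))) : Nat → List (Int × Int × Int) → Int → Int
  | _, [], best => best
  | 0, _ :: _, best => best   -- fuel exhausted: unreachable under Pre_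
  | fuel+1, (node, parent, dist) :: rest, best =>
    pvLoopB adj fuel
      ((pvRow adj node).foldl
        (fun st tw => if tw.1 ≠ parent then (tw.1, node, dist + tw.2) :: st else st) rest)
      (if dist > best then dist else best)

def tree_diameter_alt (adj : List (List (Int × Int))) : Int :=
  if adj.length = 0 then 0 else
    pvLoopB adj ((pvMaxLen adj + 1) ^ (2 * pvE adj + 3)) [(0, -1, 0)] 0

-- ===== PRECONDITION & SPEC =====
-- helpers for Pre_: A's walk is a graph on states (node, parent); pvSuccs gives a
-- state's successors, pvS the states reachable from the start (0, -1), and pvPrune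
-- iterates sink-pruning (a state survives iff it still has a successor), which
-- empties the reachable set exactly when the walk graph is acyclic.
def pvSuccs (adj : List (List (Int × Int))) (s : Int × Int) : List (Int × Int) :=
  (pvRow adj s.1).filterMap (fun tw => if tw.1 ≠ s.2 then some (tw.1, s.1) else none)
def pvKB (adj : List (List (Int × Int))) : Nat := 2 * pvE adj + 2
def pvStates (adj : List (List (Int × Int))) : Nat → List (Int × Int)
  | 0 => [(0, -1)]
  | k+1 => PySem.Set.ofList (pvStates adj k ++ (pvStates adj k).flatMap (pvSuccs adj))
def pvS (adj : List (List (Int × Int))) : List (Int × Int) := pvStates adj (pvKB adj)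
def pvPruneStep (adj : List (List (Int × Int))) (X : List (Int × Int)) : List (Int × Int) :=
  X.filter (fun s => (pvSuccs adj s).any (fun t => X.contains t))
def pvPrune (adj : List (List (Int × Int))) : Nat → List (Int × Int)
  | 0 => pvS adj
  | k+1 => pvPruneStep adj (pvPrune adj k)

-- Pre_ holds exactly where A returns: A raises IndexError when its parent-excluding
-- walk from node 0 reaches an out-of-range index and RecursionError when that walk
-- cycles; Pre_ states that every reachable walk state is in range, the reachable
-- state set is closed under steps, and iterated sink-pruning empties it (the walk
-- graph is acyclic, so A's DFS terminates).  It excludes nothing A returns on.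
def Pre_tree_diameter (adj : List (List (Int × Int))) : Prop :=
  adj = [] ∨
  ((∀ s ∈ pvS adj, -(adj.length : Int) ≤ s.1 ∧ s.1 < (adj.length : Int)) ∧
   (∀ s ∈ pvS adj, ∀ t ∈ pvSuccs adj s, t ∈ pvS adj) ∧
   pvPrune adj (pvKB adj) = [])
instance (adj : List (List (Int × Int))) : Decidable (Pre_tree_diameter adj) := by
  unfold Pre_tree_diameter; infer_instance

def pvWitness_tree_diameter : (List (List (Int × Int))) := [[(1, 3), (2, 1)], [], []]

def Spec_tree_diameter (adj : List (List (Int × Int))) (out : Int) : Prop := out = tree_diameter_alt adj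
instance (adj : List (List (Int × Int))) (out : Int) : Decidable (Spec_tree_diameter adj out) := by unfold Spec_tree_diameter; infer_instance

-- ===== CLAIM (what is proved, stated in full; the proofs are below) =====
def Claim_equal_tree_diameter : Prop := ∀ (adj : List (List (Int × Int))), Dom_tree_diameter adj → Pre_tree_diameter adj → Spec_tree_diameter adj (tree_diameter adj)

-- ===== LEMMAS AND PROOFS =====

-- ---- rows ----

theorem pvRow_mem {adj : List (List (Int × Int))} {v : Int}
    (h1 : -(adj.length : Int) ≤ v) (h2 : v < (adj.length : Int)) :
    pvRow adj v ∈ adj := by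
  by_cases hv : (0:Int) ≤ v
  · rw [pvRow, PySem.List.pyGet?_eq_some_getElem adj hv h2, Option.getD_some]
    exact List.getElem_mem _
  · have hk0 : 0 < (-v).toNat := by omega
    have hkn : (-v).toNat ≤ adj.length := by omega
    have h0 := PySem.List.pyGet?_neg_natCast (xs := adj) (k := (-v).toNat) hk0 hkn
    have h1' : PySem.List.pyGet? adj v = adj[adj.length - (-v).toNat]? := by
      conv_lhs => rw [show v = -(((-v).toNat : Nat) : Int) by omega]
      exact h0
    have hlt : adj.length - (-v).toNat < adj.length := by omega
    rw [pvRow, h1', List.getElem?_eq_getElem hlt, Option.getD_some]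
    exact List.getElem_mem _

-- ---- reachable states ----

theorem pvStates_succ_sub {adj : List (List (Int × Int))} {k : Nat} :
    ∀ s ∈ pvStates adj k, s ∈ pvStates adj (k+1) := by
  intro s hs
  show s ∈ PySem.Set.ofList _
  rw [PySem.Set.mem_ofList]
  exact List.mem_append.mpr (Or.inl hs)

theorem pvStates_mono {adj : List (List (Int × Int))} {k k' : Nat} (h : k ≤ k') :
    ∀ s ∈ pvStates adj k, s ∈ pvStates adj k' := by
  induction k' with
  | zero => intro s hs; exact (Nat.le_zero.mp h) ▸ hs
  | succ m ih =>
    rcases Nat.lt_or_ge k (m+1) with hlt | hge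
    · intro s hs; exact pvStates_succ_sub _ (ih (by omega) s hs)
    · intro s hs; rwa [show k = m + 1 by omega] at hs

theorem pvStart_mem (adj : List (List (Int × Int))) : ((0 : Int), (-1 : Int)) ∈ pvS adj :=
  pvStates_mono (Nat.zero_le _) _ (by simp [pvStates])

theorem pvSuccs_mem {adj : List (List (Int × Int))} {v p : Int} {tw : Int × Int}
    (htw : tw ∈ pvRow adj v) (hp : tw.1 ≠ p) : (tw.1, v) ∈ pvSuccs adj (v, p) := by
  unfold pvSuccs
  exact List.mem_filterMap.mpr ⟨tw, htw, by rw [if_pos hp]⟩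

-- ---- the rank of a state: how many prunes it survives ----

theorem pvRank_ex (adj : List (List (Int × Int)))
    (hE : pvPrune adj (pvKB adj) = []) (s : Int × Int) :
    ∃ k, s ∉ pvPrune adj k := ⟨pvKB adj, by simp [hE]⟩

def pvRank (adj : List (List (Int × Int))) (hE : pvPrune adj (pvKB adj) = [])
    (s : Int × Int) : Nat := Nat.find (pvRank_ex adj hE s)

theorem pvRank_le (adj : List (List (Int × Int))) (hE : pvPrune adj (pvKB adj) = [])
    (s : Int × Int) : pvRank adj hE s ≤ pvKB adj :=
  Nat.find_min' _ (by simp [hE])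

theorem pvRank_pos {adj : List (List (Int × Int))} (hE : pvPrune adj (pvKB adj) = [])
    {s : Int × Int} (hS : s ∈ pvS adj) : 1 ≤ pvRank adj hE s := by
  by_contra h
  have h0 : pvRank adj hE s = 0 := by omega
  have := Nat.find_spec (pvRank_ex adj hE s)
  rw [show pvRank adj hE s = Nat.find (pvRank_ex adj hE s) from rfl] at h0
  rw [h0] at this
  exact this hS

theorem pvRank_succ_lt {adj : List (List (Int × Int))} (hE : pvPrune adj (pvKB adj) = [])
    {s t : Int × Int} (hS : s ∈ pvS adj) (ht : t ∈ pvSuccs adj s) :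
    pvRank adj hE t < pvRank adj hE s := by
  have hk1 : 1 ≤ pvRank adj hE s := pvRank_pos hE hS
  obtain ⟨e, he⟩ : ∃ e, pvRank adj hE s = e + 1 := ⟨pvRank adj hE s - 1, by omega⟩
  have hspec : s ∉ pvPrune adj (pvRank adj hE s) := Nat.find_spec (pvRank_ex adj hE s)
  have hmem : s ∈ pvPrune adj e := by
    by_contra h
    have h2 : pvRank adj hE s ≤ e := Nat.find_min' (pvRank_ex adj hE s) h
    omega
  rw [he, show pvPrune adj (e+1) = pvPruneStep adj (pvPrune adj e) from rfl] at hspec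
  unfold pvPruneStep at hspec
  have hpred : ¬ ((pvSuccs adj s).any (fun t => (pvPrune adj e).contains t) = true) := by
    intro hpred
    exact hspec (List.mem_filter.mpr ⟨hmem, hpred⟩)
  have htno : t ∉ pvPrune adj e := by
    intro hmem'
    exact hpred (List.any_eq_true.mpr ⟨t, ht, by simpa using hmem'⟩)
  have h3 : pvRank adj hE t ≤ e := Nat.find_min' (pvRank_ex adj hE t) htno
  omega

-- ---- stability of A's dfs in the fuel ----

theorem pvStab {adj : List (List (Int × Int))}
    (hC : ∀ s ∈ pvS adj, ∀ t ∈ pvSuccs adj s, t ∈ pvS adj)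
    (hE : pvPrune adj (pvKB adj) = []) :
    ∀ (f₁ f₂ : Nat) (v p : Int), (v, p) ∈ pvS adj →
      pvRank adj hE (v, p) < f₁ → pvRank adj hE (v, p) < f₂ →
      (pvDfsA adj f₁ v p).2 = (pvDfsA adj f₂ v p).2 := by
  intro f₁
  induction f₁ with
  | zero => intro f₂ v p _ hf₁ _; omega
  | succ g₁ ih =>
    intro f₂ v p hS hf₁ hf₂
    obtain ⟨g₂, rfl⟩ : ∃ g₂, f₂ = g₂ + 1 := ⟨f₂ - 1, by omega⟩
    simp only [pvDfsA]
    refine PySem.List.foldl_congr_mem _ _ _ _ ?_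
    intro acc tw htw
    by_cases hp : tw.1 = p
    · simp [hp]
    · simp only [ne_eq, hp, not_false_eq_true, if_true]
      have hsucc := pvSuccs_mem htw hp
      have hS' : (tw.1, v) ∈ pvS adj := hC _ hS _ hsucc
      have hlt : pvRank adj hE (tw.1, v) < pvRank adj hE (v, p) :=
        pvRank_succ_lt hE hS hsucc
      have hrec : (pvDfsA adj g₁ tw.1 v).2 = (pvDfsA adj g₂ tw.1 v).2 :=
        ih g₂ tw.1 v hS' (by omega) (by omega)
      omega

-- the stable value of a state
def pvM (adj : List (List (Int × Int))) (v p : Int) : Int :=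
  (pvDfsA adj (pvKB adj + 1) v p).2

theorem pvM_unfold {adj : List (List (Int × Int))}
    (hC : ∀ s ∈ pvS adj, ∀ t ∈ pvSuccs adj s, t ∈ pvS adj)
    (hE : pvPrune adj (pvKB adj) = []) {v p : Int} (hS : (v, p) ∈ pvS adj) :
    pvM adj v p = (pvRow adj v).foldl
      (fun md tw => if tw.1 ≠ p then max md (pvM adj tw.1 v + tw.2) else md) 0 := by
  show (pvDfsA adj (pvKB adj + 1) v p).2 = _
  simp only [pvDfsA]
  refine PySem.List.foldl_congr_mem _ _ _ _ ?_
  intro acc tw htw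
  by_cases hp : tw.1 = p
  · simp [hp]
  · simp only [ne_eq, hp, not_false_eq_true, if_true]
    have hsucc := pvSuccs_mem htw hp
    have hS' : (tw.1, v) ∈ pvS adj := hC _ hS _ hsucc
    have hlt : pvRank adj hE (tw.1, v) < pvRank adj hE (v, p) :=
      pvRank_succ_lt hE hS hsucc
    have hle := pvRank_le adj hE (v, p)
    have hrec : (pvDfsA adj (pvKB adj) tw.1 v).2 = pvM adj tw.1 v :=
      pvStab hC hE _ _ tw.1 v hS' (by omega) (by omega)
    omega

theorem pvDfsA_nonneg (adj : List (List (Int × Int))) :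
    ∀ (f : Nat) (v p : Int), 0 ≤ (pvDfsA adj f v p).2 := by
  intro f
  cases f with
  | zero => intro v p; exact le_rfl
  | succ g =>
    intro v p
    simp only [pvDfsA]
    have : ∀ (l : List (Int × Int)) (i : Int), 0 ≤ i →
        0 ≤ l.foldl (fun md tw => if tw.1 ≠ p then max md ((pvDfsA adj g tw.1 v).2 + tw.2) else md) i := by
      intro l
      induction l with
      | nil => intro i hi; exact hi
      | cons x l ih =>
        intro i hi
        simp only [List.foldl_cons]
        split <;> [exact ih _ (by omega); exact ih _ hi]
    exact this _ 0 le_rfl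

-- ---- the row-length bound ----

theorem pvFoldl_max_start_le :
    ∀ (L : List (List (Int × Int))) (b : Nat), b ≤ L.foldl (fun m x => max m x.length) b := by
  intro L
  induction L with
  | nil => intro b; exact le_rfl
  | cons y L ihy =>
    intro b
    exact le_trans (le_max_left b y.length) (ihy _)

theorem pvFoldl_max_le {l : List (Int × Int)} :
    ∀ (L : List (List (Int × Int))) (a : Nat), l ∈ L →
      l.length ≤ L.foldl (fun m x => max m x.length) a := by
  intro L
  induction L with
  | nil => intro a h; exact absurd h (List.not_mem_nil)
  | cons x L ih =>
    intro a h
    rcases List.mem_cons.mp h with rfl | h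
    · exact le_trans (le_max_right a l.length) (pvFoldl_max_start_le L _)
    · exact ih _ h

-- ---- generic fold lemmas ----

theorem pvFoldl_cons_filter_shape {α β : Type} (g : α → β) (c : α → Bool) :
    ∀ (l : List α) (init : List β),
      l.foldl (fun st x => if c x then g x :: st else st) init
        = ((l.filter c).map g).reverse ++ init := by
  intro l
  induction l with
  | nil => intro init; simp
  | cons x l ih =>
    intro init
    by_cases hc : c x <;> simp [hc, ih]

theorem pvMax_foldl_comm {α : Type} (u : α → Int) :
    ∀ (l : List α) (a : Int) (x : α),
      l.foldl (fun b y => max b (u y)) (max a (u x)) =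
      max (l.foldl (fun b y => max b (u y)) a) (u x) := by
  intro l
  induction l with
  | nil => intro a x; rfl
  | cons z l ih =>
    intro a x
    simp only [List.foldl_cons]
    rw [show max (max a (u x)) (u z) = max (max a (u z)) (u x) by omega, ih]

theorem pvMax_foldl_reverse {α : Type} (u : α → Int) :
    ∀ (l : List α) (a : Int),
      l.reverse.foldl (fun b y => max b (u y)) a = l.foldl (fun b y => max b (u y)) a := by
  intro l
  induction l with
  | nil => intro a; rfl
  | cons x l ih =>
    intro a
    simp only [List.reverse_cons, List.foldl_append, List.foldl_cons, List.foldl_nil, ih]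
    rw [pvMax_foldl_comm u l a x]

theorem pvMax_foldl_dist {α : Type} (g : α → Int) (d : Int) :
    ∀ (l : List α) (c m : Int),
      l.foldl (fun b x => max b (d + g x)) (max c (d + m)) =
      max c (d + l.foldl (fun b x => max b (g x)) m) := by
  intro l
  induction l with
  | nil => intro c m; rfl
  | cons x l ih =>
    intro c m
    simp only [List.foldl_cons]
    rw [show max (max c (d + m)) (d + g x) = max c (d + max m (g x)) by omega, ih]

-- fold with an if-guard = fold of the filtered list
theorem pvFoldl_if_filter {α β : Type} (c : α → Bool) (f : β → α → β) :
    ∀ (l : List α) (i : β),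
      l.foldl (fun acc x => if c x then f acc x else acc) i = (l.filter c).foldl f i := by
  intro l
  induction l with
  | nil => intro i; rfl
  | cons x l ih =>
    intro i
    by_cases hc : c x <;> simp [hc, ih]

-- ---- B-side invariant ----

theorem pvLoopB_inv {adj : List (List (Int × Int))}
    (hIn : ∀ s ∈ pvS adj, -(adj.length : Int) ≤ s.1 ∧ s.1 < (adj.length : Int))
    (hC : ∀ s ∈ pvS adj, ∀ t ∈ pvSuccs adj s, t ∈ pvS adj)
    (hE : pvPrune adj (pvKB adj) = []) :
    ∀ (fuel : Nat) (stack : List (Int × Int × Int)) (best : Int),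
      (∀ s ∈ stack, (s.1, s.2.1) ∈ pvS adj) →
      (stack.map (fun s => (pvMaxLen adj + 1) ^ (pvRank adj hE (s.1, s.2.1)))).sum ≤ fuel →
      pvLoopB adj fuel stack best =
        stack.foldl (fun b s => max b (s.2.2 + pvM adj s.1 s.2.1)) best := by
  intro fuel
  induction fuel with
  | zero =>
    intro stack best hgood hfuel
    cases stack with
    | nil => rfl
    | cons s rest =>
      exfalso
      simp only [List.map_cons, List.sum_cons] at hfuel
      have : 0 < (pvMaxLen adj + 1) ^ (pvRank adj hE (s.1, s.2.1)) :=
        pow_pos (by omega) _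
      omega
  | succ f ih =>
    intro stack best hgood hfuel
    cases stack with
    | nil => rfl
    | cons s rest =>
      obtain ⟨v, p, d⟩ := s
      have hS : ((v : Int), (p : Int)) ∈ pvS adj := hgood _ (List.mem_cons_self ..)
      have hvrange := hIn _ hS
      have hrkpos : 1 ≤ pvRank adj hE (v, p) := pvRank_pos hE hS
      simp only [pvLoopB]
      set L := pvRow adj v with hL
      set c : Int × Int → Bool := fun tw => tw.1 != p with hc
      have hpush : L.foldl (fun st tw => if tw.1 ≠ p then (tw.1, v, d + tw.2) :: st else st) rest
          = ((L.filter c).map (fun tw => (tw.1, v, d + tw.2))).reverse ++ rest := by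
        rw [← pvFoldl_cons_filter_shape (fun tw : Int × Int => (tw.1, v, d + tw.2)) c L rest]
        refine PySem.List.foldl_congr_mem _ _ _ _ ?_
        intro acc tw _
        by_cases hp : tw.1 = p <;> simp [hc, hp]
      rw [hpush]
      have hmemfilter : ∀ tw ∈ L.filter c, tw ∈ L ∧ tw.1 ≠ p := by
        intro tw htw
        have h1 := List.of_mem_filter htw
        refine ⟨List.mem_of_mem_filter htw, by simpa [hc] using h1⟩
      -- goodness of the new stack entries, with strictly smaller rank
      have hchild : ∀ tw ∈ L.filter c,
          (tw.1, v) ∈ pvS adj ∧ pvRank adj hE (tw.1, v) < pvRank adj hE (v, p) := by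
        intro tw htw
        obtain ⟨htwL, hp⟩ := hmemfilter tw htw
        have hsucc := pvSuccs_mem (hL ▸ htwL) hp
        exact ⟨hC _ hS _ hsucc, pvRank_succ_lt hE hS hsucc⟩
      have hgood' : ∀ s ∈ ((L.filter c).map (fun tw => (tw.1, v, d + tw.2))).reverse ++ rest,
          (s.1, s.2.1) ∈ pvS adj := by
        intro s hsmem
        rcases List.mem_append.mp hsmem with hsm | hsm
        · rw [List.mem_reverse] at hsm
          obtain ⟨tw, htw, rfl⟩ := List.mem_map.mp hsm
          exact (hchild tw htw).1
        · exact hgood _ (List.mem_cons_of_mem _ hsm)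
      -- fuel bound for the new stack
      have hrowlen : L.length ≤ pvMaxLen adj :=
        pvFoldl_max_le adj 0 (hL ▸ pvRow_mem hvrange.1 hvrange.2)
      have hD : ∀ tw ∈ L.filter c,
          (pvMaxLen adj + 1) ^ (pvRank adj hE (tw.1, v))
            ≤ (pvMaxLen adj + 1) ^ (pvRank adj hE (v, p) - 1) := by
        intro tw htw
        have := (hchild tw htw).2
        exact Nat.pow_le_pow_right (by omega) (by omega)
      have hsumchild : (((L.filter c).map (fun tw => (tw.1, v, d + tw.2))).reverse.map
          (fun s => (pvMaxLen adj + 1) ^ (pvRank adj hE (s.1, s.2.1)))).sum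
          ≤ pvMaxLen adj * (pvMaxLen adj + 1) ^ (pvRank adj hE (v, p) - 1) := by
        rw [List.map_reverse, List.sum_reverse, List.map_map]
        set D := (pvMaxLen adj + 1) ^ (pvRank adj hE (v, p) - 1) with hD'
        have h1 : ∀ x ∈ (L.filter c).map
            ((fun s : Int × Int × Int => (pvMaxLen adj + 1) ^ (pvRank adj hE (s.1, s.2.1))) ∘
              (fun tw : Int × Int => (tw.1, v, d + tw.2))), x ≤ D := by
          intro x hx
          obtain ⟨tw, htw, rfl⟩ := List.mem_map.mp hx
          exact hD tw htw
        calc ((L.filter c).map _).sum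
            ≤ ((L.filter c).map
                ((fun s : Int × Int × Int => (pvMaxLen adj + 1) ^ (pvRank adj hE (s.1, s.2.1))) ∘
                  (fun tw : Int × Int => (tw.1, v, d + tw.2)))).length * D :=
              List.sum_le_card_nsmul _ _ h1
          _ ≤ pvMaxLen adj * D := by
              have := List.length_filter_le c L
              simp only [List.length_map]
              exact Nat.mul_le_mul_right _ (by omega)
      have hpot : 1 + pvMaxLen adj * (pvMaxLen adj + 1) ^ (pvRank adj hE (v, p) - 1)
          ≤ (pvMaxLen adj + 1) ^ (pvRank adj hE (v, p)) := by
        obtain ⟨e, he⟩ : ∃ e, pvRank adj hE (v, p) = e + 1 :=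
          ⟨pvRank adj hE (v, p) - 1, by omega⟩
        rw [he, Nat.add_sub_cancel, pow_succ]
        have h1 : 1 ≤ (pvMaxLen adj + 1) ^ e := Nat.one_le_pow _ _ (by omega)
        nlinarith
      have hfuel2 : (pvMaxLen adj + 1) ^ (pvRank adj hE (v, p)) +
          (rest.map (fun s => (pvMaxLen adj + 1) ^ (pvRank adj hE (s.1, s.2.1)))).sum ≤ f + 1 := by
        simpa using hfuel
      have hfuel' : ((((L.filter c).map (fun tw => (tw.1, v, d + tw.2))).reverse ++ rest).map
          (fun s => (pvMaxLen adj + 1) ^ (pvRank adj hE (s.1, s.2.1)))).sum ≤ f := by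
        simp only [List.map_append, List.sum_append]
        omega
      rw [ih _ _ hgood' hfuel']
      -- now pure max-fold algebra
      simp only [List.foldl_cons, List.foldl_append]
      congr 1
      rw [pvMax_foldl_reverse (fun s : Int × Int × Int => s.2.2 + pvM adj s.1 s.2.1)]
      rw [List.foldl_map]
      have hstep : (fun (b : Int) (tw : Int × Int) =>
            max b ((fun s : Int × Int × Int => s.2.2 + pvM adj s.1 s.2.1) (tw.1, v, d + tw.2)))
          = fun b tw => max b (d + (pvM adj tw.1 v + tw.2)) := by
        funext b tw; simp only; omega
      have hif : (if d > best then d else best) = max best (d + 0) := by omega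
      rw [hstep, hif, pvMax_foldl_dist (fun tw : Int × Int => pvM adj tw.1 v + tw.2) d
        (L.filter c) best 0]
      congr 1
      rw [pvM_unfold hC hE hS, ← hL]
      rw [← pvFoldl_if_filter c (fun md tw => max md (pvM adj tw.1 v + tw.2)) L 0]
      congr 1
      refine PySem.List.foldl_congr_mem _ _ _ _ ?_
      intro acc tw _
      by_cases hp : tw.1 = p <;> simp [hc, hp]

-- ===== VERDICT (by name: the statement is the Claim_ definition above) =====
theorem tree_diameter_spec : Claim_equal_tree_diameter := by
  intro adj _ hP
  show tree_diameter adj = tree_diameter_alt adj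
  rcases hP with rfl | ⟨hIn, hC, hE⟩
  · rfl
  · by_cases hemp : adj.length = 0
    · have : adj = [] := List.length_eq_zero_iff.mp hemp
      subst this
      rfl
    · have hA : tree_diameter adj = pvM adj 0 (-1) := by
        unfold tree_diameter pvM pvKB
        rw [if_neg hemp, show 2 * pvE adj + 2 + 1 = 2 * pvE adj + 3 by omega]
      have hB : tree_diameter_alt adj = max 0 (0 + pvM adj 0 (-1)) := by
        unfold tree_diameter_alt
        rw [if_neg hemp]
        rw [pvLoopB_inv hIn hC hE _ [(0, -1, 0)] 0
          (by
            intro s hs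
            simp only [List.mem_singleton] at hs
            subst hs
            exact pvStart_mem adj)
          (by
            simp only [List.map_cons, List.map_nil, List.sum_cons, List.sum_nil, Nat.add_zero]
            refine Nat.pow_le_pow_right (by omega) ?_
            have := pvRank_le adj hE (0, -1)
            unfold pvKB at this
            omega)]
        rfl
      have hpos : 0 ≤ pvM adj 0 (-1) := pvDfsA_nonneg adj _ 0 (-1)
      rw [hA, hB]
      omega
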